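-- pv_equiv track=rewrite | github.com/Helazior/balles_rebondissantes | balles_rebondissantes/objet.py | make_grille
-- ===== SOURCE A (Python) =====
-- def make_grille(nbCasesY, nbCasesX):
--     grille_obstacle = [0]*nbCasesY
--     for i in range (nbCasesY):
--         grille_obstacle[i] = [0]*nbCasesX
--
--     for i in range(nbCasesX):
--         for j in range(nbCasesY):
--             grille_obstacle[j][i] = ((i-nbCasesX//2)**2>-500*j+300000)#300000
--             #grille_obstacle[j][i] = 100 < j
--
--     return grille_obstacle
-- ===== SOURCE B (Python) =====
-- def make_grille(nbCasesY, nbCasesX):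
--     # Row-wise band construction: row j is all True except the parabola band
--     # |i - cx| <= d where d = floor(sqrt(T)), T = 300000 - 500*j.
--     cx = nbCasesX // 2
--     grid = []
--     d = 548  # 548*548 = 300304 > 300000, a valid upper start for the descent
--     for j in range(nbCasesY):
--         T = 300000 - 500 * j
--         if T < 0:
--             grid.append([True] * nbCasesX)
--         else:
--             while d * d > T:  # d only ever shrinks as T decreases row by row
--                 d -= 1
--             lo = max(0, cx - d)
--             hi = min(nbCasesX, cx + d + 1)
--             grid.append([True] * lo + [False] * (hi - lo) + [True] * (nbCasesX - hi))
--     return grid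
-- ===== Notes on version B (the rewrite author's own statement) =====
-- stated objective: faster
-- what changed: Instead of evaluating the squared-distance comparison for every cell of a pre-allocated grid in column-major order, B builds each row directly as True-band ++ False-band ++ True-band around the parabola centre, computing the band radius with an integer square-root descent that only ever shrinks from one row to the next.
import Mathlib
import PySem

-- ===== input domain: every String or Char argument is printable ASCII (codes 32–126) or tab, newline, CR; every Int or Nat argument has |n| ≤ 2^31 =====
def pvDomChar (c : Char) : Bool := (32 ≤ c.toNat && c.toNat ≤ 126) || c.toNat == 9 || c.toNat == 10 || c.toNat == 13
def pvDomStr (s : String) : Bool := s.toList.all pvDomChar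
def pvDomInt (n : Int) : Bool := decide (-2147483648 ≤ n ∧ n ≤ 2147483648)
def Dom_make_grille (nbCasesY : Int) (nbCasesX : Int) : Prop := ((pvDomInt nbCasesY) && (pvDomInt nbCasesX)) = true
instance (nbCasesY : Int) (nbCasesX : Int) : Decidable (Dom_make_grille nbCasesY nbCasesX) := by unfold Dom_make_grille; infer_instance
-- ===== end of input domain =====

-- B builds each row as True-band ++ False-band ++ True-band from an integer-sqrt radius that only
-- shrinks row by row, instead of A's per-cell squared comparison over a mutated nested grid (objective: faster).

-- ===== PORT A =====
-- grille_obstacle = [0]*nbCasesY ; the int-0 placeholders are ported as []/false: every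
-- surviving cell is overwritten with a bool before the grid is returned (empty rows stay empty).
def make_grille (nbCasesY : Int) (nbCasesX : Int) : List (List Bool) :=
  let g0 : List (List Bool) := List.replicate nbCasesY.toNat []
  -- for i in range(nbCasesY): grille_obstacle[i] = [0]*nbCasesX
  let g1 := (PySem.List.pyRange 0 nbCasesY 1).foldl
      (fun g i => g.set i.toNat (List.replicate nbCasesX.toNat false)) g0
  -- for i in range(nbCasesX): for j in range(nbCasesY):
  --   grille_obstacle[j][i] = ((i-nbCasesX//2)**2 > -500*j+300000)
  (PySem.List.pyRange 0 nbCasesX 1).foldl (fun g i =>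
    (PySem.List.pyRange 0 nbCasesY 1).foldl (fun g j =>
      g.modify j.toNat (fun row => row.set i.toNat
        (decide ((i - PySem.Int.floordiv nbCasesX 2)^2 > -500*j + 300000)))) g) g1

-- ===== PORT B =====
-- while d*d > T: d -= 1   (guarded by 0 ≤ T, so the descent stops; structural on d)
def pvShrink : Nat → Int → Nat
  | 0, _ => 0
  | d+1, T => if ((d:Int)+1)*((d:Int)+1) > T then pvShrink d T else d+1

-- one iteration of B's row loop, carrying (grid built so far, current radius d)
def pvStepB (X cx : Int) (s : List (List Bool) × Nat) (j : Int) : List (List Bool) × Nat :=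
  let T := 300000 - 500*j
  if T < 0 then (s.1 ++ [List.replicate X.toNat true], s.2)
  else
    let d := pvShrink s.2 T
    let lo := max 0 (cx - (d:Int))
    let hi := min X (cx + (d:Int) + 1)
    (s.1 ++ [List.replicate lo.toNat true ++ List.replicate (hi-lo).toNat false ++
             List.replicate (X-hi).toNat true], d)

def make_grille_alt (nbCasesY : Int) (nbCasesX : Int) : List (List Bool) :=
  ((PySem.List.pyRange 0 nbCasesY 1).foldl
    (pvStepB nbCasesX (PySem.Int.floordiv nbCasesX 2)) ([], 548)).1

-- ===== PRECONDITION & SPEC =====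
def Spec_make_grille (nbCasesY : Int) (nbCasesX : Int) (out : List (List Bool)) : Prop := out = make_grille_alt nbCasesY nbCasesX
instance (nbCasesY : Int) (nbCasesX : Int) (out : List (List Bool)) : Decidable (Spec_make_grille nbCasesY nbCasesX out) := by unfold Spec_make_grille; infer_instance

-- ===== CLAIM (what is proved, stated in full; the proofs are below) =====
def Claim_equal_make_grille : Prop := ∀ (nbCasesY : Int) (nbCasesX : Int), Dom_make_grille nbCasesY nbCasesX → Spec_make_grille nbCasesY nbCasesX (make_grille nbCasesY nbCasesX)

-- ===== LEMMAS AND PROOFS =====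

-- the cell predicate and the "spec grid" both programs are shown to compute
def pvP (cx : Int) (j i : Nat) : Bool := decide (((i:Int) - cx)^2 > -500*(j:Int) + 300000)
def pvRow (X cx : Int) (j : Nat) : List Bool := (List.range X.toNat).map (pvP cx j)
def pvGrid (Y X cx : Int) : List (List Bool) := (List.range Y.toNat).map (pvRow X cx)

-- A's first loop: overwriting every slot of a length-≥-n list in order yields a replicate prefix
lemma pvA1 {α : Type} (r : α) : ∀ (n : Nat) (l : List α), n ≤ l.length →
    (List.range n).foldl (fun g i => g.set i r) l = List.replicate n r ++ l.drop n := by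
  intro n
  induction n with
  | zero => intro l _; simp
  | succ n ih =>
    intro l hl
    rw [List.range_succ, List.foldl_append, ih l (by omega)]
    simp only [List.foldl_cons, List.foldl_nil]
    rw [List.set_append]
    simp only [List.length_replicate]
    rw [if_neg (by omega), Nat.sub_self, List.drop_eq_getElem_cons (show n < l.length by omega),
      List.replicate_succ', List.set_cons_zero]
    simp

-- A's inner loop: modifying slots 0..n-1 of a range-map in order
lemma pvA2 {α : Type} (f : Nat → α → α) : ∀ (n m : Nat) (g : Nat → α), n ≤ m →
    (List.range n).foldl (fun l j => l.modify j (f j)) ((List.range m).map g)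
    = (List.range m).map (fun j => if j < n then f j (g j) else g j) := by
  intro n
  induction n with
  | zero => intro m g _; simp
  | succ n ih =>
    intro m g hm
    rw [List.range_succ, List.foldl_append, ih m g (by omega)]
    simp only [List.foldl_cons, List.foldl_nil]
    apply List.ext_getElem
    · simp [List.length_modify]
    · intro i h1 h2
      rw [List.getElem_modify]
      simp only [List.getElem_map, List.getElem_range]
      simp only [List.length_map, List.length_range] at h2
      split_ifs <;> first | rfl | omega | simp_all

-- set on a range-map
lemma pvSetMap {α : Type} (g : Nat → α) (m k : Nat) (v : α) (_hk : k < m) :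
    ((List.range m).map g).set k v = (List.range m).map (fun i => if i = k then v else g i) := by
  apply List.ext_getElem
  · simp
  · intro i h1 h2
    rw [List.getElem_set]
    simp only [List.getElem_map, List.getElem_range]
    split_ifs with h3 h4 h4 <;> first | rfl | omega

-- A's column loop, characterised column by column
lemma pvAcols (Y X : Int) : ∀ k : Nat, k ≤ X.toNat →
    (List.range k).foldl (fun g i =>
      (List.range Y.toNat).foldl (fun g j => g.modify j (fun row => row.set i
        (decide (((i:Int) - X/2)^2 > -500*(j:Int) + 300000)))) g)
      ((List.range Y.toNat).map (fun _ => List.replicate X.toNat false))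
    = (List.range Y.toNat).map (fun j => (List.range X.toNat).map
        (fun i => if i < k then pvP (X/2) j i else false)) := by
  intro k
  induction k with
  | zero =>
    intro _
    simp only [List.range_zero, List.foldl_nil]
    apply List.map_congr_left
    intro j _
    simp
  | succ k ih =>
    intro hk
    rw [List.range_succ, List.foldl_append, ih (by omega)]
    simp only [List.foldl_cons, List.foldl_nil]
    have h2 := pvA2 (f := fun j row => row.set k
        (decide (((k:Int) - X/2)^2 > -500*(j:Int) + 300000))) (n := Y.toNat) (m := Y.toNat)
        (g := fun j => (List.range X.toNat).map (fun i => if i < k then pvP (X/2) j i else false))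
        (le_refl _)
    rw [h2]
    apply List.map_congr_left
    intro j hj
    simp only [List.mem_range] at hj
    rw [if_pos (by simp [hj])]
    beta_reduce
    rw [pvSetMap _ _ _ _ (by omega)]
    apply List.map_congr_left
    intro i hi
    simp only [List.mem_range] at hi
    by_cases h1 : i = k
    · subst h1; rw [if_pos rfl, if_pos (by omega)]; rfl
    · rw [if_neg h1]
      by_cases h2 : i < k
      · rw [if_pos h2, if_pos (by omega)]
      · rw [if_neg h2, if_neg (by omega)]

-- A equals the spec grid
lemma pvAeq (Y X : Int) : make_grille Y X = pvGrid Y X (X/2) := by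
  unfold make_grille
  rw [PySem.Int.floordiv_eq_ediv_of_pos (by norm_num)]
  simp only [PySem.List.pyRange_one, Int.sub_zero, List.foldl_map, zero_add, Int.toNat_natCast]
  rw [pvA1 (List.replicate X.toNat false) Y.toNat (List.replicate Y.toNat []) (by simp)]
  simp only [List.drop_replicate, Nat.sub_self, List.replicate_zero, List.append_nil]
  rw [show List.replicate Y.toNat (List.replicate X.toNat false)
      = (List.range Y.toNat).map (fun _ => List.replicate X.toNat false) by
    simp [List.map_const']]
  rw [pvAcols Y X X.toNat (le_refl _)]
  unfold pvGrid pvRow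
  apply List.map_congr_left
  intro j _
  apply List.map_congr_left
  intro i hi
  simp only [List.mem_range] at hi
  rw [if_pos hi]

-- the while-descent lands below T …
lemma pvShrink_sq_le (T : Int) (hT : 0 ≤ T) : ∀ d : Nat, ((pvShrink d T : Int))^2 ≤ T := by
  intro d
  induction d with
  | zero => simpa [pvShrink] using hT
  | succ d ih =>
    rw [pvShrink]
    split
    · exact ih
    · rename_i hc; push_cast; nlinarith [hc]

-- … and stays within one step of it
lemma pvShrink_ub (T : Int) : ∀ d : Nat, T < ((d:Int)+1)^2 → T < ((pvShrink d T : Int)+1)^2 := by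
  intro d
  induction d with
  | zero => intro h; simpa [pvShrink] using h
  | succ d ih =>
    intro h
    rw [pvShrink]
    split
    · rename_i hc; exact ih (by nlinarith [hc])
    · rename_i hc; push_cast at hc h ⊢; nlinarith [hc, h]

-- the strict comparison is exactly "outside the band of radius d"
lemma pvBand (a d T : Int) (hd : 0 ≤ d) (h1 : d^2 ≤ T) (h2 : T < (d+1)^2) :
    (a^2 > T ↔ (a < -d ∨ d < a)) := by
  constructor
  · intro h
    by_contra hc
    rw [not_or, not_lt, not_lt] at hc
    nlinarith [sq_le_sq' hc.1 hc.2]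
  · intro h
    rcases h with h | h
    · nlinarith
    · nlinarith

-- B's banded row equals the spec row
lemma pvRowEq (X : Int) (j d : Nat)
    (_hT : 0 ≤ 300000 - 500*(j:Int))
    (h1 : ((d:Int))^2 ≤ 300000 - 500*(j:Int))
    (h2 : 300000 - 500*(j:Int) < ((d:Int)+1)^2) :
    List.replicate (max 0 (X/2 - (d:Int))).toNat true ++
    List.replicate ((min X (X/2 + (d:Int) + 1)) - (max 0 (X/2 - (d:Int)))).toNat false ++
    List.replicate (X - (min X (X/2 + (d:Int) + 1))).toNat true = pvRow X (X/2) j := by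
  have hd : (0:Int) ≤ (d:Int) := Int.natCast_nonneg d
  set cx := X/2 with hcx
  have hcx2 : 2*cx ≤ X ∧ X ≤ 2*cx + 1 := by omega
  set lo := max 0 (cx - (d:Int)) with hlo
  set hi := min X (cx + (d:Int) + 1) with hhi
  have hb : 0 ≤ lo ∧ ((X ≤ 0 ∧ lo = 0 ∧ hi = X) ∨ (0 < X ∧ lo ≤ hi ∧ hi ≤ X)) := by omega
  apply List.ext_getElem
  · simp only [List.length_append, List.length_replicate, pvRow, List.length_map,
      List.length_range]
    omega
  · intro k hk1 hk2
    simp only [pvRow, List.length_map, List.length_range] at hk2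
    simp only [pvRow]
    rw [List.getElem_map, List.getElem_range]
    have hband := pvBand ((k:Int) - cx) (d:Int) (300000 - 500*(j:Int)) hd h1 h2
    unfold pvP
    by_cases hc1 : k < lo.toNat
    · rw [List.getElem_append_left (by simp; omega), List.getElem_append_left (by simp; omega),
        List.getElem_replicate]
      symm
      simp only [decide_eq_true_eq]
      rw [show -500*(j:Int) + 300000 = 300000 - 500*(j:Int) by ring, hband]
      omega
    · by_cases hc2 : k < lo.toNat + (hi - lo).toNat
      · rw [List.getElem_append_left (by simp; omega), List.getElem_append_right (by simp; omega),
          List.getElem_replicate]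
        symm
        simp only [decide_eq_false_iff_not, not_lt]
        rw [show -500*(j:Int) + 300000 = 300000 - 500*(j:Int) by ring]
        by_contra hgt
        rw [not_le] at hgt
        rw [gt_iff_lt] at hband
        have := hband.mp hgt
        omega
      · rw [List.getElem_append_right (by simp; omega), List.getElem_replicate]
        symm
        simp only [decide_eq_true_eq]
        rw [show -500*(j:Int) + 300000 = 300000 - 500*(j:Int) by ring, hband]
        omega

-- below the parabola's reach every cell is True
lemma pvRowTrue' (X : Int) (cx : Int) (j : Nat) (hT : 300000 - 500*(j:Int) < 0) :
    List.replicate X.toNat true = (List.range X.toNat).map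
      (fun (i : Nat) => decide (((i:Int) - cx)^2 > -500*(j:Int) + 300000)) := by
  symm; rw [List.eq_replicate_iff]
  constructor
  · simp
  · intro b hb
    simp only [List.mem_map] at hb
    obtain ⟨i, _, rfl⟩ := hb
    simp only [decide_eq_true_eq]
    nlinarith [sq_nonneg ((i:Int) - cx)]

-- B's main loop, with the invariant that the carried radius is never too small
lemma pvBmain (X : Int) : ∀ (n s : Nat) (acc : List (List Bool)) (d : Nat),
    300000 - 500*(s:Int) < ((d:Int)+1)^2 →
    (((List.range' s n).map (fun (j : Nat) => (j:Int))).foldl (pvStepB X (X/2)) (acc, d)).1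
      = acc ++ (List.range' s n).map (pvRow X (X/2)) := by
  intro n
  induction n with
  | zero => intro s acc d _; simp
  | succ n ih =>
    intro s acc d hinv
    rw [List.range'_succ]
    simp only [List.map_cons, List.foldl_cons]
    by_cases hT : 300000 - 500*(s:Int) < 0
    · rw [show pvStepB X (X/2) (acc, d) (s:Int)
          = (acc ++ [List.replicate X.toNat true], d) by
        simp only [pvStepB]; rw [if_pos hT]]
      rw [ih (s+1) _ d (by push_cast; nlinarith [sq_nonneg ((d:Int)+1)])]
      rw [pvRowTrue' X (X/2) s (by omega)]
      simp [pvRow, pvP, List.append_assoc]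
    · rw [not_lt] at hT
      have hle := pvShrink_sq_le _ hT d
      have hub := pvShrink_ub _ d hinv
      rw [show pvStepB X (X/2) (acc, d) (s:Int)
          = (acc ++ [List.replicate (max 0 (X/2 - (pvShrink d (300000 - 500*(s:Int)) : Int))).toNat true ++
              List.replicate ((min X (X/2 + (pvShrink d (300000 - 500*(s:Int)) : Int) + 1))
                - (max 0 (X/2 - (pvShrink d (300000 - 500*(s:Int)) : Int)))).toNat false ++
              List.replicate ((X - (min X (X/2 + (pvShrink d (300000 - 500*(s:Int)) : Int) + 1)))).toNat true],
             pvShrink d (300000 - 500*(s:Int))) by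
        simp only [pvStepB]; rw [if_neg (by omega)]]
      rw [ih (s+1) _ _ (by push_cast at hub ⊢; nlinarith [hub])]
      rw [pvRowEq X s (pvShrink d (300000 - 500*(s:Int))) hT hle hub]
      simp [List.append_assoc]

-- B equals the spec grid
lemma pvBeq (Y X : Int) : make_grille_alt Y X = pvGrid Y X (X/2) := by
  unfold make_grille_alt
  rw [PySem.Int.floordiv_eq_ediv_of_pos (by norm_num), PySem.List.pyRange_one]
  simp only [Int.sub_zero, zero_add]
  rw [List.range_eq_range']
  rw [pvBmain X Y.toNat 0 [] 548 (by norm_num)]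
  simp [pvGrid, List.range_eq_range']

-- ===== VERDICT (by name: the statement is the Claim_ definition above) =====
theorem make_grille_spec : Claim_equal_make_grille := by
  intro Y X _
  unfold Spec_make_grille
  rw [pvAeq, pvBeq]
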